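-- pv_equiv track=rewrite | github.com/maxbergmark/old-work | Egna projekt/Tetris/newtetris.py | calcHeight
-- ===== SOURCE A (Python) =====
-- def calcHeight(matrix):
--     test = 1
--     for i in matrix:
--         for j in i:
--             if j != 'black':
--                 return len(matrix)-test
--         test += 1
--     return 0
-- ===== SOURCE B (Python) =====
-- def calcHeight(matrix):
--     filled = [i for i, row in enumerate(matrix) if any(cell != 'black' for cell in row)]
--     if not filled:
--         return 0
--     return len(matrix) - min(filled) - 1
-- ===== Notes on version B (the rewrite author's own statement) =====
-- stated objective: alternative
-- what changed: Replaces the top-down early-return scan with a counter by a collect-all-filled-row-indices pass followed by a min reduction (len(matrix) - min - 1, or 0 when none).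
import Mathlib
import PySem

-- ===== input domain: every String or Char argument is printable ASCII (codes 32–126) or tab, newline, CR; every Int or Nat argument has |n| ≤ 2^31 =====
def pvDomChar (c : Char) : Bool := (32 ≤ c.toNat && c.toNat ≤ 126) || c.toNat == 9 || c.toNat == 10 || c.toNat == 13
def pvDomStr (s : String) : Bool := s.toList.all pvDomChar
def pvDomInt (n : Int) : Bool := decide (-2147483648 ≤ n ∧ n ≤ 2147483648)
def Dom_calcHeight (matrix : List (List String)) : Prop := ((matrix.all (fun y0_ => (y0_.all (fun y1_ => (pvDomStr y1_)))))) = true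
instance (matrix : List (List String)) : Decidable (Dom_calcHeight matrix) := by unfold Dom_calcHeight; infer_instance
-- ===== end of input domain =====

-- B replaces A's top-down early-return scan (counter `test`) by a collect-filled-row-indices pass
-- followed by a min reduction (objective: alternative decomposition, same cost).


-- ===== PORT A =====
-- inner loop: `for j in i: if j != 'black': return …` (true = early return taken)
def calcHeightInner : List String → Bool
  | [] => false
  | j :: rest => if j ≠ "black" then true else calcHeightInner rest

-- outer loop with the running counter `test`
def calcHeightLoop (n : Int) : List (List String) → Int → Int
  | [], _ => 0
  | i :: rest, test => if calcHeightInner i then n - test else calcHeightLoop n rest (test + 1)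

def calcHeight (matrix : List (List String)) : Int :=
  calcHeightLoop matrix.length matrix 1

-- ===== PORT B =====
-- the comprehension `[i for i, row in enumerate(matrix) if any(cell != 'black' for cell in row)]`
def altFilled (k : Nat) : List (List String) → List Nat
  | [] => []
  | row :: rest =>
      if row.any (fun cell => cell ≠ "black") then k :: altFilled (k + 1) rest
      else altFilled (k + 1) rest

def calcHeight_alt (matrix : List (List String)) : Int :=
  let filled := altFilled 0 matrix
  match filled.min? with
  | none => 0
  | some i => (matrix.length : Int) - i - 1

-- ===== PRECONDITION & SPEC =====
def Spec_calcHeight (matrix : List (List String)) (out : Int) : Prop := out = calcHeight_alt matrix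
instance (matrix : List (List String)) (out : Int) : Decidable (Spec_calcHeight matrix out) := by unfold Spec_calcHeight; infer_instance

-- ===== CLAIM (what is proved, stated in full; the proofs are below) =====
def Claim_equal_calcHeight : Prop := ∀ (matrix : List (List String)), Dom_calcHeight matrix → Spec_calcHeight matrix (calcHeight matrix)

-- ===== LEMMAS AND PROOFS =====

theorem calcHeightInner_eq_any (row : List String) :
    calcHeightInner row = row.any (fun cell => cell ≠ "black") := by
  induction row with
  | nil => rfl
  | cons j rest ih =>
      by_cases h : j = "black" <;> simp [calcHeightInner, List.any_cons, ih, h]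

theorem altFilled_ge (k : Nat) (l : List (List String)) :
    ∀ i ∈ altFilled k l, k ≤ i := by
  induction l generalizing k with
  | nil => simp [altFilled]
  | cons row rest ih =>
      intro i hi
      simp only [altFilled] at hi
      split at hi
      · rcases List.mem_cons.mp hi with rfl | h
        · omega
        · have := ih (k + 1) i h; omega
      · have := ih (k + 1) i hi; omega

theorem foldl_min_of_ge (k : Nat) (s : List Nat) (h : ∀ i ∈ s, k ≤ i) :
    s.foldl min k = k := by
  induction s generalizing k with
  | nil => rfl
  | cons a s ih =>
      have hk : min k a = k := by
        have ha := h a (by simp); omega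
      simp only [List.foldl_cons, hk]
      exact ih k (fun i hi => h i (by simp [hi]))

theorem calcHeightLoop_eq (n : Int) (l : List (List String)) (k : Nat) :
    calcHeightLoop n l ((k : Int) + 1) =
      match (altFilled k l).min? with
      | none => 0
      | some i => n - i - 1 := by
  induction l generalizing k with
  | nil => rfl
  | cons row rest ih =>
      simp only [calcHeightLoop, calcHeightInner_eq_any, altFilled]
      by_cases h : row.any (fun cell => cell ≠ "black") = true
      · simp only [h, if_pos]
        have hmin : ((k :: altFilled (k + 1) rest).min? : Option Nat) = some k := by
          simp only [List.min?]
          rw [foldl_min_of_ge k _ (fun i hi => by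
            have := altFilled_ge (k + 1) rest i hi; omega)]
        rw [hmin]
        push_cast
        ring
      · simp only [h, if_neg, Bool.false_eq_true, not_false_iff]
        have : (k : Int) + 1 + 1 = ((k + 1 : Nat) : Int) + 1 := by push_cast; ring
        rw [this, ih (k + 1)]

-- ===== VERDICT (by name: the statement is the Claim_ definition above) =====
theorem calcHeight_spec : Claim_equal_calcHeight := by
  intro matrix _
  unfold Spec_calcHeight calcHeight calcHeight_alt
  have := calcHeightLoop_eq (matrix.length : Int) matrix 0
  simpa using this
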